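-- pv_equiv track=rewrite | github.com/yaxlie/PIRO_OCR | processing.py | calc_num_lens
-- ===== SOURCE A (Python) =====
-- def calc_num_lens(sequece):
--     lens = []
--     count = 1
--     current_num = sequece[0]
--     begin_index = 0
--
--     for i, num in enumerate(sequece[1:]):
--         if num != current_num:
--             lens.append((current_num, count, begin_index, i + 1))
--             begin_index = i + 1
--             count = 0
--             current_num = num
--         count += 1
--     lens.append((current_num, count, begin_index, len(sequece)))
--
--     return lens
-- ===== SOURCE B (Python) =====
-- def calc_num_lens(sequece):
--     n = len(sequece)
--     bounds = [0] + [i for i in range(1, n) if sequece[i] != sequece[i - 1]] + [n]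
--     return [(sequece[b], e - b, b, e) for b, e in zip(bounds, bounds[1:])]
-- ===== Notes on version B (the rewrite author's own statement) =====
-- stated objective: alternative
-- what changed: Replaces the mutable run-state loop (count/current_num/begin_index) with a boundary-index pass: collect indices where the value changes, then emit (value, length, begin, end) from consecutive boundary pairs.
import Mathlib
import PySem

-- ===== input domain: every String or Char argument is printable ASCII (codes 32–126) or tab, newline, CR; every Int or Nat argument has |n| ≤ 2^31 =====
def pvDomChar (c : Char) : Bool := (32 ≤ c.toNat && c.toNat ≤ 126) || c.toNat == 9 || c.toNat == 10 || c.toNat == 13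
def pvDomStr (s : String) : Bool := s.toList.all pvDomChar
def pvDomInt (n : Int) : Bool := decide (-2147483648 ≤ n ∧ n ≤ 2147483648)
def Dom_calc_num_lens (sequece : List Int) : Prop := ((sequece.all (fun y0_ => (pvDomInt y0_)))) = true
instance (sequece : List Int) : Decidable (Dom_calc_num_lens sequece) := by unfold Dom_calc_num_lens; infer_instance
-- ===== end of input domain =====

-- B replaces A's mutable run-state loop by a boundary-index pass; equivalence proved for nonempty input (both raise IndexError on []).

-- ===== PORT A =====
-- A's loop state (lens, count, current_num, begin_index); one fold step per element of sequece[1:].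
def pvStepA (st : List (Int × Int × Int × Int) × Int × Int × Int) (p : Int × Int) :
    List (Int × Int × Int × Int) × Int × Int × Int :=
  let (lens, count, current_num, begin_index) := st
  let (i, num) := p
  if num ≠ current_num then
    (lens ++ [(current_num, count, begin_index, i + 1)], 0 + 1, num, i + 1)
  else
    (lens, count + 1, current_num, begin_index)

def calc_num_lens (sequece : List Int) : List (Int × Int × Int × Int) :=
  let current_num : Int := PySem.List.pyGetD sequece 0 0  -- sequece[0]; IndexError on [] excluded by Pre_
  let st := (PySem.List.enumerate (PySem.List.slice sequece (some 1) none) 0).foldl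
              pvStepA ([], 1, current_num, 0)
  st.1 ++ [(st.2.2.1, st.2.1, st.2.2.2, (sequece.length : Int))]

-- ===== PORT B =====
def calc_num_lens_alt (sequece : List Int) : List (Int × Int × Int × Int) :=
  let n : Int := sequece.length
  let bounds : List Int :=
    [0] ++ (PySem.List.pyRange 1 n 1).filter
             (fun i => PySem.List.pyGetD sequece i 0 ≠ PySem.List.pyGetD sequece (i - 1) 0)
        ++ [n]
  (bounds.zip (bounds.drop 1)).map
    (fun p => (PySem.List.pyGetD sequece p.1 0, p.2 - p.1, p.1, p.2))

-- ===== PRECONDITION & SPEC =====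
-- A raises IndexError (sequece[0]) on the empty list; B raises there too.
def Pre_calc_num_lens (sequece : List Int) : Prop := sequece ≠ []
instance (sequece : List Int) : Decidable (Pre_calc_num_lens sequece) := by unfold Pre_calc_num_lens; infer_instance
def pvWitness_calc_num_lens : List Int := [1, 1, 2]

def Spec_calc_num_lens (sequece : List Int) (out : List (Int × Int × Int × Int)) : Prop := out = calc_num_lens_alt sequece
instance (sequece : List Int) (out : List (Int × Int × Int × Int)) : Decidable (Spec_calc_num_lens sequece out) := by unfold Spec_calc_num_lens; infer_instance

-- ===== CLAIM (what is proved, stated in full; the proofs are below) =====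
def Claim_equal_calc_num_lens : Prop := ∀ (sequece : List Int), Dom_calc_num_lens sequece → Pre_calc_num_lens sequece → Spec_calc_num_lens sequece (calc_num_lens sequece)

-- ===== LEMMAS AND PROOFS =====

-- Reference run-length recursion both ports are reduced to.
def runsI (b c cnt : Int) : List Int → List (Int × Int × Int × Int)
  | [] => [(c, cnt, b, b + cnt)]
  | x :: xs => if x = c then runsI b c (cnt + 1) xs
               else (c, cnt, b, b + cnt) :: runsI (b + cnt) x 1 xs

theorem foldA_runs (t : List Int) : ∀ (lens : List (Int × Int × Int × Int)) (cur cnt b s L : Int),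
    s + 1 = b + cnt → L = s + 1 + t.length →
    (let st := (PySem.List.enumerate t s).foldl pvStepA (lens, cnt, cur, b)
     st.1 ++ [(st.2.2.1, st.2.1, st.2.2.2, L)]) = lens ++ runsI b cur cnt t := by
  induction t with
  | nil =>
    intro lens cur cnt b s L h hL
    simp [PySem.List.enumerate, runsI] at *
    omega
  | cons x xs ih =>
    intro lens cur cnt b s L h hL
    rw [PySem.List.enumerate_cons]
    simp only [List.foldl_cons]
    by_cases hx : x = cur
    · have : pvStepA (lens, cnt, cur, b) (s, x) = (lens, cnt + 1, cur, b) := by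
        simp [pvStepA, hx]
      rw [this, ih lens cur (cnt + 1) b (s + 1) L (by omega) (by simp at hL ⊢; omega)]
      simp [runsI, hx]
    · have : pvStepA (lens, cnt, cur, b) (s, x)
          = (lens ++ [(cur, cnt, b, s + 1)], 1, x, s + 1) := by
        simp [pvStepA, hx]
      rw [this, ih (lens ++ [(cur, cnt, b, s + 1)]) x 1 (s + 1) (s + 1) L (by omega)
            (by simp at hL ⊢; omega)]
      simp [runsI, hx]
      constructor
      · omega
      · have hb : b + cnt = s + 1 := by omega
        rw [hb]

theorem calcA_runs (h : Int) (t : List Int) :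
    calc_num_lens (h :: t) = runsI 0 h 1 t := by
  unfold calc_num_lens
  have hs : PySem.List.slice (h :: t) (some 1) none = t := by
    have := PySem.List.slice_from_natCast (h :: t) 1
    simpa using this
  rw [hs]
  have := foldA_runs t [] h 1 0 0 ((h :: t).length : Int) (by omega) (by simp; omega)
  simpa using this

-- boundary list of B restricted to positions ≥ p
def pvBoundsFrom (v : List Int) (p : Int) : List Int :=
  (PySem.List.pyRange p v.length 1).filter
    (fun i => PySem.List.pyGetD v i 0 ≠ PySem.List.pyGetD v (i - 1) 0) ++ [(v.length : Int)]

theorem tailB_runs (v : List Int) : ∀ (k p b cnt : Nat) (c : Int),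
    p + k = v.length → b + cnt = p → 1 ≤ cnt →
    (∀ j : Nat, b ≤ j → j < p → v.getD j 0 = c) →
    (((b : Int) :: pvBoundsFrom v p).zip (pvBoundsFrom v p)).map
      (fun q => (PySem.List.pyGetD v q.1 0, q.2 - q.1, q.1, q.2))
    = runsI b c cnt (v.drop p) := by
  intro k
  induction k with
  | zero =>
    intro p b cnt c hk hb hc hseg
    have hp : p = v.length := by omega
    have hrange : PySem.List.pyRange (p : Int) v.length 1 = [] := by
      rw [hp]; simp [PySem.List.pyRange]
    have hdrop : v.drop p = [] := by rw [hp]; simp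
    have hgb : v[b]?.getD 0 = c := by
      have := hseg b (le_refl _) (by omega); simpa [List.getD] using this
    simp [pvBoundsFrom, hrange, hdrop, runsI, hgb]
    omega
  | succ k ih =>
    intro p b cnt c hk hb hc hseg
    have hplt : p < v.length := by omega
    have hx : v.drop p = v[p] :: v.drop (p + 1) := List.drop_eq_getElem_cons hplt
    have hrange : PySem.List.pyRange (p : Int) v.length 1
        = (p : Int) :: PySem.List.pyRange ((p : Int) + 1) v.length 1 := by
      apply PySem.List.pyRange_one_cons
      exact_mod_cast hplt
    have hgp : PySem.List.pyGetD v (p : Int) 0 = v[p] := by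
      simp [List.getD, hplt]
    have hgp1 : PySem.List.pyGetD v ((p : Int) - 1) 0 = c := by
      have h1 : ((p : Int) - 1) = ((p - 1 : Nat) : Int) := by omega
      rw [h1]
      simp only [PySem.List.pyGetD_natCast]
      exact hseg (p - 1) (by omega) (by omega)
    by_cases hxc : v[p] = c
    · -- same value: position p is not a boundary
      have hfilt : pvBoundsFrom v p = pvBoundsFrom v (p + 1) := by
        unfold pvBoundsFrom
        rw [hrange]
        simp only [List.filter_cons]
        rw [if_neg (by simp [hgp, hgp1, hxc])]
      rw [hfilt]
      have := ih (p + 1) b (cnt + 1) c (by omega) (by omega) (by omega)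
        (by intro j hj1 hj2
            by_cases hjp : j = p
            · subst hjp; simp [List.getD, hplt, hxc]
            · exact hseg j hj1 (by omega))
      push_cast at this
      rw [this, hx]
      simp [runsI, hxc]
    · -- new value: position p is a boundary
      have hfilt : pvBoundsFrom v p = (p : Int) :: pvBoundsFrom v (p + 1) := by
        unfold pvBoundsFrom
        rw [hrange]
        simp only [List.filter_cons]
        rw [if_pos (by simp [hgp, hgp1, hxc])]
        norm_num
      rw [hfilt]
      have hrec := ih (p + 1) p 1 (v[p]) (by omega) (by omega) (by omega)
        (by intro j hj1 hj2
            have : j = p := by omega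
            subst this; simp [List.getD, hplt])
      push_cast at hrec
      rw [hx]
      simp only [List.zip_cons_cons, List.map_cons, hrec, runsI, if_neg hxc]
      have hgb : PySem.List.pyGetD v (b : Int) 0 = c := by
        simp only [PySem.List.pyGetD_natCast]
        exact hseg b (le_refl _) (by omega)
      have hpe : ((p : Int)) = (b : Int) + cnt := by omega
      rw [hgb, hpe]
      congr 1
      simp

theorem calcB_runs (h : Int) (t : List Int) :
    calc_num_lens_alt (h :: t) = runsI 0 h 1 t := by
  unfold calc_num_lens_alt
  have hb : ([0] ++ (PySem.List.pyRange 1 ((h :: t).length : Int) 1).filter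
             (fun i => PySem.List.pyGetD (h :: t) i 0 ≠ PySem.List.pyGetD (h :: t) (i - 1) 0)
        ++ [((h :: t).length : Int)]) = (0 : Int) :: pvBoundsFrom (h :: t) 1 := by
    simp [pvBoundsFrom]
  simp only [hb, List.drop_succ_cons, List.drop_zero]
  have := tailB_runs (h :: t) t.length 1 0 1 h (by simp; omega) (by omega) (by omega)
    (by intro j hj1 hj2
        have : j = 0 := by omega
        subst this; simp [List.getD])
  simpa using this

-- ===== VERDICT (by name: the statement is the Claim_ definition above) =====
theorem calc_num_lens_spec : Claim_equal_calc_num_lens := by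
  intro sequece _ hpre
  unfold Spec_calc_num_lens
  cases sequece with
  | nil => exact absurd rfl hpre
  | cons h t => rw [calcA_runs, calcB_runs]
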